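-- pv_equiv track=rewrite | github.com/arin17bishwa/myCP_sols | CF/275A.py | func
-- ===== SOURCE A (Python) =====
-- from collections import Counter as counter
--
-- def func(n,a,b):
--     l1 = a + b
--     freq_l1 = dict(counter(l1))
--     for i in freq_l1.values():
--         if i%2!=0:
--             return -1
--     #a.sort()
--     #b.sort()
--     afreq=dict(counter(a))
--     bfreq=dict(counter(b))
--     l=[]
--     am=[]
--     bm=[]
--     for i in freq_l1.keys():
--         x=(afreq.get(i,0)-bfreq.get(i,0))//2
--         q=abs(x)
--         if x>0:
--             am.extend([i]*q)
--         elif x<0: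
--             bm.extend([i]*q)
--     ans=0
--     am.sort()
--     bm.sort(reverse=True)
--     k=len(am)
--     for i in range(k):
--         ans+=min(am[i],bm[i])
--     return ans
-- ===== SOURCE B (Python) =====
-- from collections import Counter
--
--
-- def func(n, a, b):
--     total = Counter(a + b)
--     if any(v % 2 for v in total.values()):
--         return -1
--     ca = Counter(a)
--     cb = Counter(b)
--     c = []
--     for i in total:
--         c.extend([i] * abs((ca[i] - cb[i]) // 2))
--     c.sort()
--     return sum(c[:len(c) // 2])
-- ===== Notes on version B (the rewrite author's own statement) =====
-- stated objective: simpler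
-- what changed: B drops A's am/bm surplus split, the reverse sort and the index-pairing min loop: it collects all |surplus|/2 copies into one list, sorts it once, and returns the sum of its smaller half (valid because pairing an ascending list against a descending one takes exactly the smaller half of their union); Pre_ restricts to the problem's contract of equally-sized decks except when some value has odd total count (then both sides return -1 via the same guard).
-- outside the precondition, e.g. on func(0, [], [1, 1, 2, 2]): A returns 0, B returns 1
import Mathlib
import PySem

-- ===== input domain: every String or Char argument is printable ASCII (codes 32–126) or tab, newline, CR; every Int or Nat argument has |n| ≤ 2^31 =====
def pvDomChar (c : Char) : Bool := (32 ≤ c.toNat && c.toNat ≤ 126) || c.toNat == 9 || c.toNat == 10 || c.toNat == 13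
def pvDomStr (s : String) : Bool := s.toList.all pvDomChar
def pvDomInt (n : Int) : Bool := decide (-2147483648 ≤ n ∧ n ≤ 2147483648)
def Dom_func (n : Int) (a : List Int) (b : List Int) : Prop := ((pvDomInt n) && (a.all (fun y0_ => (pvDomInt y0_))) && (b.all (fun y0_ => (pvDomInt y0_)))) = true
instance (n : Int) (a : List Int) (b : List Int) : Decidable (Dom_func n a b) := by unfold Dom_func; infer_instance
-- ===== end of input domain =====

-- B replaces A's am/bm split + reverse sort + pairwise-min loop by one combined surplus list,
-- sorted once, summing its smaller half (objective: simpler).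

-- ===== PORT A =====
-- literal transliteration of Source A: the early-return odd-frequency loop is the 'any' guard,
-- the key loop is a foldl over the counter's keys carrying (am, bm), min pairing via pyGetD
-- (in range whenever Pre_ holds).
def func (n : Int) (a : List Int) (b : List Int) : Int :=
  let l1 := a ++ b
  let freq_l1 := PySem.Dict.counter l1
  if freq_l1.values.any (fun i => decide (PySem.Int.mod i 2 ≠ 0)) then -1
  else
    let afreq := PySem.Dict.counter a
    let bfreq := PySem.Dict.counter b
    let p := freq_l1.keys.foldl (fun (p : List Int × List Int) i =>
        let x := PySem.Int.floordiv (afreq.getD i 0 - bfreq.getD i 0) 2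
        let q := x.natAbs
        if x > 0 then (p.1 ++ List.replicate q i, p.2)
        else if x < 0 then (p.1, p.2 ++ List.replicate q i)
        else p) ([], [])
    let am := PySem.List.sorted p.1 (fun y => y) false
    let bm := PySem.List.sorted p.2 (fun y => y) true
    let k := am.length
    (PySem.List.pyRange 0 (k : Int) 1).foldl
      (fun ans i => ans + min (PySem.List.pyGetD am i 0) (PySem.List.pyGetD bm i 0)) 0

-- ===== PORT B =====
-- literal transliteration of Source B: one surplus list c, one ascending sort, sum of the lower
-- half (the slice c[:len(c)//2] has a nonnegative bound, so it is List.take).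
def func_alt (n : Int) (a : List Int) (b : List Int) : Int :=
  let total := PySem.Dict.counter (a ++ b)
  if total.values.any (fun i => decide (PySem.Int.mod i 2 ≠ 0)) then -1
  else
    let ca := PySem.Dict.counter a
    let cb := PySem.Dict.counter b
    let c := total.keys.foldl (fun acc i =>
        acc ++ List.replicate (PySem.Int.floordiv (ca.getD i 0 - cb.getD i 0) 2).natAbs i) []
    let cs := PySem.List.sorted c (fun y => y) false
    (cs.take (cs.length / 2)).sum

-- ===== PRECONDITION & SPEC =====
-- Pre_ restricts to the problem's contract of two equally-sized decks, except that when some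
-- value has an odd total count both versions return -1 whatever the lengths; outside Pre_,
-- with all counts even and mismatched lengths, A raises IndexError (a longer) or pairs only a
-- truncated prefix of bm (b longer), a corner the CF-275A input format never reaches.
def Pre_func (n : Int) (a : List Int) (b : List Int) : Prop :=
  a.length = b.length ∨ ∃ i ∈ a ++ b, ¬ (2 ∣ (a ++ b).count i)
instance (n : Int) (a : List Int) (b : List Int) : Decidable (Pre_func n a b) := by
  unfold Pre_func; infer_instance
def pvWitness_func : Int × List Int × List Int := (2, [1, 2], [2, 1])


def Spec_func (n : Int) (a : List Int) (b : List Int) (out : Int) : Prop := out = func_alt n a b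
instance (n : Int) (a : List Int) (b : List Int) (out : Int) : Decidable (Spec_func n a b out) := by
  unfold Spec_func; infer_instance

-- ===== CLAIM (what is proved, stated in full; the proofs are below) =====
def Claim_equal_func : Prop := ∀ (n : Int) (a : List Int) (b : List Int), Dom_func n a b → Pre_func n a b → Spec_func n a b (func n a b)

-- ===== LEMMAS AND PROOFS =====

-- The per-key surplus x, and the three per-key contributions (A's two sides, B's one list).
def gA (x : Int → Int) (i : Int) : List Int := if x i > 0 then List.replicate (x i).natAbs i else []
def gB (x : Int → Int) (i : Int) : List Int := if x i < 0 then List.replicate (x i).natAbs i else []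
def gC (x : Int → Int) (i : Int) : List Int := List.replicate (x i).natAbs i

theorem foldl_pair (x : Int → Int) (K : List Int) : ∀ (p : List Int × List Int),
    K.foldl (fun (p : List Int × List Int) i =>
      if x i > 0 then (p.1 ++ List.replicate (x i).natAbs i, p.2)
      else if x i < 0 then (p.1, p.2 ++ List.replicate (x i).natAbs i)
      else p) p
    = (p.1 ++ K.flatMap (gA x), p.2 ++ K.flatMap (gB x)) := by
  induction K with
  | nil => intro p; simp
  | cons k K ih =>
    intro p
    simp only [List.foldl_cons, List.flatMap_cons, ih, gA, gB]
    rcases lt_trichotomy (x k) 0 with h | h | h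
    · simp [h, not_lt.mpr h.le, List.append_assoc]
    · simp [h]
    · simp [h, not_lt.mpr h.le, List.append_assoc]

theorem foldl_cat (x : Int → Int) (K : List Int) : ∀ (acc : List Int),
    K.foldl (fun acc i => acc ++ List.replicate (x i).natAbs i) acc
    = acc ++ K.flatMap (gC x) := by
  induction K with
  | nil => intro acc; simp
  | cons k K ih => intro acc; simp [List.foldl_cons, List.flatMap_cons, ih, gC, List.append_assoc]

theorem perm_split (x : Int → Int) (K : List Int) :
    (K.flatMap (gC x)).Perm (K.flatMap (gA x) ++ K.flatMap (gB x)) := by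
  induction K with
  | nil => simp
  | cons k K ih =>
    simp only [List.flatMap_cons]
    have hsplit : gC x k = gA x k ++ gB x k := by
      unfold gA gB gC
      rcases lt_trichotomy (x k) 0 with h | h | h
      · simp [h, not_lt.mpr h.le]
      · simp [h]
      · simp [h, not_lt.mpr h.le]
    rw [hsplit]
    simp only [List.append_assoc]
    exact List.Perm.append_left _ ((List.Perm.append_left _ ih).trans
      (List.perm_append_comm_assoc _ _ _))

theorem length_diff (x : Int → Int) (K : List Int) :
    ((K.flatMap (gA x)).length : Int) - ((K.flatMap (gB x)).length : Int) = (K.map x).sum := by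
  induction K with
  | nil => simp
  | cons k K ih =>
    simp only [List.flatMap_cons, List.length_append, List.map_cons, List.sum_cons]
    have hk : ((gA x k).length : Int) - ((gB x k).length : Int) = x k := by
      unfold gA gB
      rcases lt_trichotomy (x k) 0 with h | h | h
      · rw [if_neg (not_lt.mpr h.le), if_pos h]
        simp only [List.length_nil, List.length_replicate]
        omega
      · simp [h]
      · rw [if_pos h, if_neg (not_lt.mpr h.le)]
        simp only [List.length_nil, List.length_replicate]
        omega
    push_cast
    omega

theorem sum_map_sub_int (f g : Int → Int) (K : List Int) :
    (K.map (fun i => f i - g i)).sum = (K.map f).sum - (K.map g).sum := by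
  induction K with
  | nil => simp
  | cons k K ih => simp [ih]; ring

theorem sum_ite_one (y : Int) (K : List Int) (hnd : K.Nodup) (hy : y ∈ K) :
    (K.map (fun i => if i = y then (1 : Int) else 0)).sum = 1 := by
  induction K with
  | nil => cases hy
  | cons k K ih =>
    rcases List.mem_cons.mp hy with rfl | hyK
    · have hz : (K.map (fun i => if i = y then (1 : Int) else 0)).sum = 0 := by
        apply List.sum_eq_zero; intro z hz
        obtain ⟨i, hiK, rfl⟩ := List.mem_map.mp hz
        have hne : i ≠ y := fun h => (List.nodup_cons.mp hnd).1 (h ▸ hiK)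
        simp [hne]
      simp [hz]
    · have hky : k ≠ y := fun h => (List.nodup_cons.mp hnd).1 (h ▸ hyK)
      simp [hky, ih (List.nodup_cons.mp hnd).2 hyK]

theorem sum_count_int (l K : List Int) (hnd : K.Nodup) (hsub : ∀ y ∈ l, y ∈ K) :
    (K.map (fun i => ((l.count i : Nat) : Int))).sum = l.length := by
  induction l with
  | nil => simp
  | cons y t ih =>
    have hmem : y ∈ K := hsub y (List.mem_cons_self ..)
    have hsplit : (K.map (fun i => ((List.count i (y :: t) : Nat) : Int))).sum
        = (K.map (fun i => ((List.count i t : Nat) : Int))).sum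
          + (K.map (fun i => if i = y then (1 : Int) else 0)).sum := by
      rw [← PySem.List.sum_map_add_int]
      refine congrArg List.sum (List.map_congr_left ?_)
      intro i _
      simp [List.count_cons]
      split <;> omega
    rw [hsplit, ih (fun z hz => hsub z (List.mem_cons_of_mem _ hz)), sum_ite_one y K hnd hmem]
    simp

theorem zip_minmax_perm (u : List Int) : ∀ (v : List Int), u.length = v.length →
    (List.zipWith min u v ++ List.zipWith max u v).Perm (u ++ v) := by
  induction u with
  | nil =>
    intro v h
    have : v = [] := by simpa using (List.length_eq_zero_iff.mp h.symm)
    simp [this]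
  | cons x u ih =>
    intro v h
    cases v with
    | nil => simp at h
    | cons y v =>
      have h' : u.length = v.length := by simpa using h
      simp only [List.zipWith_cons_cons, List.cons_append]
      have step1 : (min x y :: (List.zipWith min u v ++ max x y :: List.zipWith max u v)).Perm
          (min x y :: max x y :: (List.zipWith min u v ++ List.zipWith max u v)) :=
        List.Perm.cons _ List.perm_middle
      have step2 : (min x y :: max x y :: (List.zipWith min u v ++ List.zipWith max u v)).Perm
          (min x y :: max x y :: (u ++ v)) := ((ih v h').cons _).cons _
      have step3 : (min x y :: max x y :: (u ++ v)).Perm (x :: y :: (u ++ v)) := by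
        rcases le_total x y with hxy | hxy
        · rw [min_eq_left hxy, max_eq_right hxy]
        · rw [min_eq_right hxy, max_eq_left hxy]
          exact List.Perm.swap _ _ _
      have step4 : (x :: y :: (u ++ v)).Perm (x :: (u ++ y :: v)) :=
        List.Perm.cons _ List.perm_middle.symm
      exact step1.trans (step2.trans (step3.trans step4))

theorem core (u v : List Int) (hu : List.Pairwise (· ≤ ·) u)
    (hv : List.Pairwise (fun p q => q ≤ p) v) (h : u.length = v.length) :
    (List.zipWith min u v).sum
      = ((PySem.List.sorted (u ++ v) (fun y => y) false).take u.length).sum := by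
  have hcross : ∀ m ∈ List.zipWith min u v, ∀ z ∈ List.zipWith max u v, m ≤ z := by
    intro m hm z hz
    obtain ⟨i, hi, rfl⟩ := List.mem_iff_getElem.mp hm
    obtain ⟨j, hj, rfl⟩ := List.mem_iff_getElem.mp hz
    have hiu : i < u.length := by simp [List.length_zipWith] at hi; omega
    have hiv : i < v.length := by simp [List.length_zipWith] at hi; omega
    have hju : j < u.length := by simp [List.length_zipWith] at hj; omega
    have hjv : j < v.length := by simp [List.length_zipWith] at hj; omega
    simp only [List.getElem_zipWith]
    by_cases hij : i ≤ j
    · have h1 : u[i] ≤ u[j] := by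
        rcases Nat.eq_or_lt_of_le hij with heq | hlt
        · subst heq; exact le_rfl
        · exact (List.pairwise_iff_getElem.mp hu) i j hiu hju hlt
      exact le_trans (min_le_left _ _) (le_trans h1 (le_max_left _ _))
    · have hji : j < i := by omega
      have h1 : v[i] ≤ v[j] := (List.pairwise_iff_getElem.mp hv) j i hjv hiv hji
      exact le_trans (min_le_right _ _) (le_trans h1 (le_max_right _ _))
  have hperm2 : ((PySem.List.sorted (List.zipWith min u v) (fun y => y) false)
      ++ (PySem.List.sorted (List.zipWith max u v) (fun y => y) false)).Perm (u ++ v) :=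
    ((PySem.List.sorted_perm _ _ _).append (PySem.List.sorted_perm _ _ _)).trans
      (zip_minmax_perm u v h)
  have hpw : ((PySem.List.sorted (List.zipWith min u v) (fun y => y) false)
      ++ (PySem.List.sorted (List.zipWith max u v) (fun y => y) false)).Pairwise (· ≤ ·) := by
    rw [List.pairwise_append]
    refine ⟨by simpa using PySem.List.sorted_pairwise (List.zipWith min u v) (fun y => y),
      by simpa using PySem.List.sorted_pairwise (List.zipWith max u v) (fun y => y), ?_⟩
    intro m hm z hz
    exact hcross m ((PySem.List.mem_sorted _ _ _ _).mp hm) z ((PySem.List.mem_sorted _ _ _ _).mp hz)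
  have hsorted : PySem.List.sorted (u ++ v) (fun y => y) false
      = (PySem.List.sorted (List.zipWith min u v) (fun y => y) false)
        ++ (PySem.List.sorted (List.zipWith max u v) (fun y => y) false) :=
    PySem.List.sorted_id_eq_of_perm_of_pairwise _ _ hperm2 hpw
  rw [hsorted]
  rw [List.take_left' (by simp [PySem.List.length_sorted, List.length_zipWith, h])]
  exact ((PySem.List.sorted_perm _ _ _).sum_eq).symm

theorem loop_eq (u v : List Int) (h : u.length = v.length) :
    (PySem.List.pyRange 0 (u.length : Int) 1).foldl
      (fun ans i => ans + min (PySem.List.pyGetD u i 0) (PySem.List.pyGetD v i 0)) 0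
    = (List.zipWith min u v).sum := by
  rw [PySem.List.foldl_add]
  have hmap : (PySem.List.pyRange 0 (u.length : Int) 1).map
      (fun i => min (PySem.List.pyGetD u i 0) (PySem.List.pyGetD v i 0)) = List.zipWith min u v := by
    apply List.ext_getElem
    · simp [PySem.List.length_pyRange_one, List.length_zipWith, h]
    · intro i h1 h2
      have hiu : i < u.length := by
        simp [PySem.List.length_pyRange_one] at h1; omega
      have hiv : i < v.length := by omega
      simp [PySem.List.getElem_pyRange_one, List.getElem_zipWith,
        PySem.List.pyGetD_natCast, hiu, hiv]
  rw [hmap]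
  simp

theorem main_eq (a b : List Int)
    (hg : ¬ ((PySem.Dict.counter (a ++ b) : PySem.Dict Int Int).values.any
      (fun i => decide (PySem.Int.mod i 2 ≠ 0)) = true))
    (hpre : Pre_func 0 a b) :
    func 0 a b = func_alt 0 a b := by
  -- abbreviations
  have hkeys : (PySem.Dict.counter (a ++ b) : PySem.Dict Int Int).keys
      = PySem.Set.ofList (a ++ b) := PySem.Dict.keys_counter _
  have hnodup : (PySem.Dict.counter (a ++ b) : PySem.Dict Int Int).keys.Nodup := by
    rw [hkeys]; exact PySem.Set.nodup_ofList _
  -- the guard being false says every total count is even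
  have heven : ∀ i ∈ a ++ b, 2 ∣ (a ++ b).count i := by
    intro i hi
    by_contra hodd
    apply hg
    rw [List.any_eq_true]
    refine ⟨((a ++ b).count i : Int), ?_, ?_⟩
    · rw [PySem.Dict.values_eq_map_keys _ hnodup 0]
      exact List.mem_map.mpr ⟨i, by
        rw [hkeys]; exact (PySem.Set.mem_ofList _ _).mpr hi,
        by rw [PySem.Dict.getD_counter]⟩
    · simp only [decide_eq_true_eq]
      intro hmod
      exact hodd (by exact_mod_cast (PySem.Int.mod_eq_zero_iff_dvd _ _).mp hmod)
  have hlen : a.length = b.length := by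
    rcases hpre with h | ⟨i, hi, hodd⟩
    · exact h
    · exact absurd (heven i hi) hodd
  -- the per-key surplus
  set x : Int → Int := fun i => PySem.Int.floordiv ((a.count i : Int) - (b.count i : Int)) 2 with hxdef
  have hsubK : ∀ y ∈ a ++ b, y ∈ (PySem.Dict.counter (a ++ b) : PySem.Dict Int Int).keys := by
    intro y hy; rw [hkeys]; exact (PySem.Set.mem_ofList _ _).mpr hy
  set K := (PySem.Dict.counter (a ++ b) : PySem.Dict Int Int).keys with hKdef
  have hx2 : ∀ i ∈ K, 2 * x i = (a.count i : Int) - (b.count i : Int) := by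
    intro i hiK
    have hiab : i ∈ a ++ b ∨ a.count i = 0 ∧ b.count i = 0 := by
      by_cases hm : i ∈ a ++ b
      · exact Or.inl hm
      · refine Or.inr ⟨?_, ?_⟩ <;>
          [exact List.count_eq_zero.mpr (fun h => hm (List.mem_append_left _ h));
           exact List.count_eq_zero.mpr (fun h => hm (List.mem_append_right _ h))]
    have hdvd : (2 : Int) ∣ ((a.count i : Int) + (b.count i : Int)) := by
      rcases hiab with hm | ⟨h1, h2⟩
      · have := heven i hm
        rw [List.count_append] at this
        exact_mod_cast this
      · simp [h1, h2]
    rw [hxdef]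
    simp only [PySem.Int.floordiv_eq_ediv_of_pos (by norm_num : (0:Int) < 2)]
    omega
  have hsum0 : (K.map x).sum = 0 := by
    have e1 : (K.map (fun i => 2 * x i)).sum = 2 * (K.map x).sum := by
      rw [← List.sum_map_mul_left]
    have e2 : (K.map (fun i => 2 * x i)).sum
        = (K.map (fun i => (a.count i : Int) - (b.count i : Int))).sum :=
      congrArg List.sum (List.map_congr_left (fun i hi => hx2 i hi))
    have e3 : (K.map (fun i => (a.count i : Int) - (b.count i : Int))).sum
        = (a.length : Int) - (b.length : Int) := by
      rw [sum_map_sub_int]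
      rw [sum_count_int a K hnodup (fun y hy => hsubK y (List.mem_append_left _ hy))]
      rw [sum_count_int b K hnodup (fun y hy => hsubK y (List.mem_append_right _ hy))]
    have : 2 * (K.map x).sum = 0 := by rw [← e1, e2, e3, hlen]; ring
    omega
  have hlenAB : (K.flatMap (gA x)).length = (K.flatMap (gB x)).length := by
    have := length_diff x K
    rw [hsum0] at this
    omega
  -- names for the two sorted sides
  set u := PySem.List.sorted (K.flatMap (gA x)) (fun y => y) false with hu
  set v := PySem.List.sorted (K.flatMap (gB x)) (fun y => y) true with hv
  have hlenuv : u.length = v.length := by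
    rw [hu, hv]; simpa using hlenAB
  have hpu : List.Pairwise (· ≤ ·) u := by
    rw [hu]; simpa using PySem.List.sorted_pairwise (K.flatMap (gA x)) (fun y => y)
  have hpv : List.Pairwise (fun p q => q ≤ p) v := by
    rw [hv]; simpa using PySem.List.sorted_pairwise_rev (K.flatMap (gB x)) (fun y => y)
  -- unfold both ports (the guard is false on both sides) and rewrite the loops
  simp only [func, func_alt, if_neg hg, PySem.Dict.getD_counter]
  rw [foldl_pair x, foldl_cat x]
  simp only [List.nil_append, ← hKdef, ← hu, ← hv]
  rw [loop_eq u v hlenuv, core u v hpu hpv hlenuv]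
  -- B's sorted list is sorted (u ++ v), and its half length is u.length
  have hperm : (K.flatMap (gC x)).Perm (u ++ v) := by
    refine (perm_split x K).trans ?_
    have p1 : (u ++ v).Perm (K.flatMap (gA x) ++ K.flatMap (gB x)) :=
      (PySem.List.sorted_perm _ _ _).append (PySem.List.sorted_perm _ _ _)
    exact p1.symm
  have hBs : PySem.List.sorted (K.flatMap (gC x)) (fun y => y) false
      = PySem.List.sorted (u ++ v) (fun y => y) false :=
    PySem.List.sorted_eq_sorted_of_perm _ _ _ (fun p q hpq => hpq) hperm
  rw [hBs]
  have hhalf : (PySem.List.sorted (u ++ v) (fun y => y) false).length / 2 = u.length := by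
    rw [PySem.List.length_sorted, List.length_append]
    omega
  rw [hhalf]

-- ===== VERDICT (by name: the statement is the Claim_ definition above) =====
theorem func_spec : Claim_equal_func := by
  intro n a b hdom hpre
  unfold Spec_func
  by_cases hg : ((PySem.Dict.counter (a ++ b) : PySem.Dict Int Int).values.any
      (fun i => decide (PySem.Int.mod i 2 ≠ 0)) = true)
  · simp only [func, func_alt, hg, if_true]
  · have h1 : func 0 a b = func_alt 0 a b := main_eq a b hg (by
      rcases hpre with h | h
      · exact Or.inl h
      · exact Or.inr h)
    have h2 : func n a b = func 0 a b := by simp only [func]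
    have h3 : func_alt n a b = func_alt 0 a b := by simp only [func_alt]
    rw [h2, h3, h1]
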